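-- pv_equiv track=rewrite | github.com/STUST-KOTEWEI/ModernReader | backend/app/services/cognitive_optimizer.py | _simplify_vocabulary
-- ===== SOURCE A (Python) =====
-- def _simplify_vocabulary(text: str) -> str:
--     """Replace complex words with simpler alternatives."""
--     # Placeholder: In production, use NLP models
--     replacements = {
--         "utilize": "use",
--         "demonstrate": "show",
--         "subsequently": "then",
--         "numerous": "many",
--         "facilitate": "help",
--     }
--
--     simplified = text
--     for complex_word, simple_word in replacements.items():
--         simplified = simplified.replace(complex_word, simple_word)
--
--     return simplified
-- ===== SOURCE B (Python) =====
-- # The five replacement passes are fused into one streaming pipeline: each stage is a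
-- # little buffer automaton that performs its word's replacement incrementally, so the
-- # text is traversed once end-to-end instead of being rewritten five times.
-- _SIMPLER = (
--     ("utilize", "use"),
--     ("demonstrate", "show"),
--     ("subsequently", "then"),
--     ("numerous", "many"),
--     ("facilitate", "help"),
-- )
--
--
-- def _sub(source, word, simple):
--     """Stream `source` with every occurrence of `word` replaced by `simple`."""
--     buf = ""
--     for ch in source:
--         buf += ch
--         while True:
--             if word.startswith(buf):
--                 if buf == word:
--                     yield from simple
--                     buf = ""
--                 break
--             yield buf[0]
--             buf = buf[1:]
--     yield from buf
--
--
-- def _simplify_vocabulary(text: str) -> str: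
--     """Replace complex words with simpler alternatives."""
--     stream = iter(text)
--     for complex_word, simple_word in _SIMPLER:
--         stream = _sub(stream, complex_word, simple_word)
--     return "".join(stream)
-- ===== Notes on version B (the rewrite author's own statement) =====
-- stated objective: alternative
-- what changed: B fuses A's five sequential full-text str.replace passes into a single streaming pass: a pipeline of five generator stages, each an incremental buffer automaton that performs its word's replacement on the fly, so the text is traversed once end-to-end instead of being materialized and rescanned five times.
import Mathlib
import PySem

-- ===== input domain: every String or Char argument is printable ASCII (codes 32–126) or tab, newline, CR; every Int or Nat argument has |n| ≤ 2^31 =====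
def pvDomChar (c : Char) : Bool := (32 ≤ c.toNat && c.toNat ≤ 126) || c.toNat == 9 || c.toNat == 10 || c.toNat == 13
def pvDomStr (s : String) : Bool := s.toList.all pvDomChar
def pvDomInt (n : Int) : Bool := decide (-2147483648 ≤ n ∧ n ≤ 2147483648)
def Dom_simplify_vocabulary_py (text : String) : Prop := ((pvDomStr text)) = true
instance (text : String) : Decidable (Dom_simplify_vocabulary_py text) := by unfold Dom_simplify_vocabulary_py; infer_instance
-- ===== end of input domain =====

-- B fuses A's five sequential full-text replace passes into one streaming pass built
-- from per-word buffer automata (an alternative evaluation strategy, same values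
-- everywhere); we prove the two agree on every input.


-- ===== PORT A =====
def simplify_vocabulary_py (text : String) : String :=
  let replacements : PySem.Dict String String :=
    PySem.Dict.ofList
      [("utilize", "use"), ("demonstrate", "show"), ("subsequently", "then"),
       ("numerous", "many"), ("facilitate", "help")]
  replacements.items.foldl (fun simplified kv => PySem.Str.replace simplified kv.1 kv.2) text

-- ===== PORT B =====
-- Source B's _SIMPLER table
def pvPairs : List (List Char × List Char) :=
  [("utilize".toList, "use".toList), ("demonstrate".toList, "show".toList),
   ("subsequently".toList, "then".toList), ("numerous".toList, "many".toList),
   ("facilitate".toList, "help".toList)]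

-- Source B's inner `while True` of _sub: pending buffer `buf` is shifted out from the front
-- until it is a prefix of `word` again (emitting as it goes), a full match emits
-- `simple` and clears the buffer; returns (emitted characters, new buffer)
def pvSubInner (word simple : List Char) : List Char → List Char × List Char
  | [] => ([], [])
  | b :: bs =>
    if (b :: bs).isPrefixOf word then
      if (b :: bs) == word then (simple, []) else ([], b :: bs)
    else
      let p := pvSubInner word simple bs
      (b :: p.1, p.2)

-- Source B's `for ch in source` loop of _sub, plus the final `yield from buf` flush
def pvSubGo (word simple : List Char) : List Char → List Char → List Char
  | buf, [] => buf
  | buf, c :: rest =>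
    let p := pvSubInner word simple (buf ++ [c])
    p.1 ++ pvSubGo word simple p.2 rest

-- one _sub stage, started with an empty buffer
def pvSubL (word simple source : List Char) : List Char :=
  pvSubGo word simple [] source

-- the pipeline `stream = _sub(stream, word, simple)` over the table, then "".join
def simplify_vocabulary_py_alt (text : String) : String :=
  String.ofList (pvPairs.foldl (fun stream kv => pvSubL kv.1 kv.2 stream) text.toList)

-- ===== PRECONDITION & SPEC =====
def Spec_simplify_vocabulary_py (text : String) (out : String) : Prop :=
  out = simplify_vocabulary_py_alt text
instance (text : String) (out : String) : Decidable (Spec_simplify_vocabulary_py text out) := by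
  unfold Spec_simplify_vocabulary_py; infer_instance

-- ===== CLAIM (what is proved, stated in full; the proofs are below) =====
def Claim_equal_simplify_vocabulary_py : Prop :=
  ∀ (text : String), Dom_simplify_vocabulary_py text →
    Spec_simplify_vocabulary_py text (simplify_vocabulary_py text)

-- ===== LEMMAS AND PROOFS =====

-- Clean structural version of PySem.Chars.replace's scan (for nonempty `old`)
def pvR (old new : List Char) : List Char → List Char
  | [] => []
  | c :: t =>
    if old.isPrefixOf (c :: t) then new ++ pvR old new (t.drop (old.length - 1))
    else c :: pvR old new t
termination_by l => l.length
decreasing_by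
  all_goals simp

lemma pvR_nil (old new : List Char) : pvR old new [] = [] := by rw [pvR]

lemma pvR_cons (old new : List Char) (c : Char) (t : List Char) :
    pvR old new (c :: t) =
      if old.isPrefixOf (c :: t) then new ++ pvR old new (t.drop (old.length - 1))
      else c :: pvR old new t := by
  rw [pvR]

lemma pvR_cons_neg (old new : List Char) (c : Char) (t : List Char)
    (h : ¬ old <+: (c :: t)) : pvR old new (c :: t) = c :: pvR old new t := by
  rw [pvR_cons, if_neg (by simpa [List.isPrefixOf_iff_prefix] using h)]

lemma pvR_prefix (old new : List Char) (s : List Char) (hne : old ≠ [])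
    (h : old <+: s) : pvR old new s = new ++ pvR old new (s.drop old.length) := by
  cases s with
  | nil => exact absurd (List.prefix_nil.mp h) hne
  | cons c t =>
    rw [pvR_cons, if_pos (List.isPrefixOf_iff_prefix.mpr h)]
    obtain ⟨m, hm⟩ : ∃ m, old.length = m + 1 := by
      cases old with
      | nil => exact absurd rfl hne
      | cons a l => exact ⟨l.length, rfl⟩
    rw [hm]
    simp [List.drop_succ_cons]

-- Bridge to PySem's replace
lemma pvR_go (old new : List Char) (h : old ≠ []) :
    ∀ (fuel : Nat) (l acc : List Char), l.length ≤ fuel →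
      PySem.Chars.replace.go old new fuel l acc = acc.reverse ++ pvR old new l := by
  intro fuel
  induction fuel with
  | zero =>
    intro l acc hl
    have : l = [] := List.eq_nil_of_length_eq_zero (Nat.le_zero.mp hl)
    subst this
    rw [PySem.Chars.replace.go.eq_def]
    simp [pvR_nil]
  | succ f ih =>
    intro l acc hl
    cases l with
    | nil => rw [PySem.Chars.replace.go.eq_def]; simp [pvR_nil]
    | cons c t =>
      rw [PySem.Chars.replace.go.eq_def]
      simp only []
      by_cases hp : old.isPrefixOf (c :: t)
      · rw [if_pos hp]
        have hop : 1 ≤ old.length := by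
          cases old with
          | nil => exact absurd rfl h
          | cons a l => simp
        have hlen : (List.drop old.length (c :: t)).length ≤ f := by
          simp only [List.length_drop, List.length_cons] at *
          omega
        rw [ih _ _ hlen]
        rw [pvR_cons, if_pos hp]
        obtain ⟨m, hm⟩ : ∃ m, old.length = m + 1 := ⟨old.length - 1, by omega⟩
        rw [hm]
        simp [List.drop_succ_cons]
      · rw [if_neg hp]
        have hlen : t.length ≤ f := by simpa using hl
        rw [ih _ _ hlen]
        rw [pvR_cons, if_neg hp]
        simp

lemma replace_eq_pvR (l old new : List Char) (h : old ≠ []) :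
    PySem.Chars.replace l old new = pvR old new l := by
  unfold PySem.Chars.replace
  rw [if_neg (by simpa [List.isEmpty_iff] using h)]
  simpa using pvR_go old new h l.length l [] le_rfl

-- A's value, at the character-list level
def pvA (s : List Char) : List Char :=
  pvR "facilitate".toList "help".toList
    (pvR "numerous".toList "many".toList
      (pvR "subsequently".toList "then".toList
        (pvR "demonstrate".toList "show".toList
          (pvR "utilize".toList "use".toList s))))

lemma portA_toList (text : String) :
    (simplify_vocabulary_py text).toList = pvA text.toList := by
  have hitems : (PySem.Dict.ofList
      [("utilize", "use"), ("demonstrate", "show"), ("subsequently", "then"),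
       ("numerous", "many"), ("facilitate", "help")] : PySem.Dict String String).items
      = [("utilize", "use"), ("demonstrate", "show"), ("subsequently", "then"),
         ("numerous", "many"), ("facilitate", "help")] := by decide
  simp only [simplify_vocabulary_py, hitems, List.foldl_cons, List.foldl_nil,
    PySem.Str.toList_replace]
  rw [replace_eq_pvR _ "utilize".toList "use".toList (by decide),
      replace_eq_pvR _ "demonstrate".toList "show".toList (by decide),
      replace_eq_pvR _ "subsequently".toList "then".toList (by decide),
      replace_eq_pvR _ "numerous".toList "many".toList (by decide),
      replace_eq_pvR _ "facilitate".toList "help".toList (by decide)]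
  rfl

-- ---------- the streaming stage equals the scan ----------

lemma pvR_short (word v : List Char) :
    ∀ s : List Char, s.length < word.length → pvR word v s = s := by
  intro s
  induction s with
  | nil => intro _; exact pvR_nil _ _
  | cons c t ih =>
    intro hl
    have hnp : ¬ word <+: (c :: t) := fun hp => by
      have := hp.length_le
      omega
    rw [pvR_cons_neg _ _ _ _ hnp, ih (by simp at hl; omega)]

-- the new buffer is always a proper prefix of `word`
lemma pvSubInner_snd (word v : List Char) (hw : word ≠ []) :
    ∀ b : List Char, (pvSubInner word v b).2 <+: word ∧ (pvSubInner word v b).2 ≠ word := by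
  intro b
  induction b with
  | nil =>
    refine ⟨List.nil_prefix, fun h => hw h.symm⟩
  | cons c bs ih =>
    simp only [pvSubInner]
    by_cases hpre : (c :: bs).isPrefixOf word
    · rw [if_pos hpre]
      by_cases heq : (c :: bs) = word
      · rw [if_pos (by simpa using heq)]
        exact ⟨List.nil_prefix, fun h => hw h.symm⟩
      · rw [if_neg (by simpa using heq)]
        exact ⟨List.isPrefixOf_iff_prefix.mp hpre, heq⟩
    · rw [if_neg hpre]
      exact ih

-- emitting the inner step commutes with the scan
lemma pvSubInner_fst (word v : List Char) (hw : word ≠ []) :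
    ∀ (b rest : List Char), b.length ≤ word.length →
      pvR word v (b ++ rest)
        = (pvSubInner word v b).1 ++ pvR word v ((pvSubInner word v b).2 ++ rest) := by
  intro b
  induction b with
  | nil => intro rest _; simp [pvSubInner]
  | cons c bs ih =>
    intro rest hlen
    simp only [pvSubInner]
    by_cases hpre : (c :: bs).isPrefixOf word
    · rw [if_pos hpre]
      by_cases heq : (c :: bs) = word
      · rw [if_pos (by simpa using heq)]
        rw [heq, pvR_prefix _ _ _ hw (List.prefix_append _ _), List.drop_left]
        simp
      · rw [if_neg (by simpa using heq)]
        simp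
    · rw [if_neg hpre]
      have hnom : ¬ word <+: (c :: bs) ++ rest := by
        intro hk
        rcases List.prefix_or_prefix_of_prefix (List.prefix_append (c :: bs) rest) hk
          with hcb | hcb
        · exact hpre (List.isPrefixOf_iff_prefix.mpr hcb)
        · have hlw : word.length ≤ (c :: bs).length := hcb.length_le
          have : word = c :: bs := hcb.eq_of_length (by omega)
          exact hpre (List.isPrefixOf_iff_prefix.mpr (this ▸ List.prefix_refl _))
      rw [show (c :: bs) ++ rest = c :: (bs ++ rest) from rfl] at hnom
      rw [show (c :: bs) ++ rest = c :: (bs ++ rest) from rfl,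
          pvR_cons_neg _ _ _ _ hnom,
          ih rest (le_trans (by simp) hlen)]
      simp

-- the stage loop, from any proper-prefix buffer, is the scan of buffer ++ input
lemma pvSubGo_spec (word v : List Char) (hw : word ≠ []) :
    ∀ (rest buf : List Char), buf <+: word → buf ≠ word →
      pvSubGo word v buf rest = pvR word v (buf ++ rest) := by
  intro rest
  induction rest with
  | nil =>
    intro buf hp hne
    have hlt : buf.length < word.length :=
      lt_of_le_of_ne hp.length_le (fun h => hne (hp.eq_of_length h))
    rw [List.append_nil, pvR_short _ _ _ hlt]
    rfl
  | cons c rest ih =>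
    intro buf hp hne
    have hlt : buf.length < word.length :=
      lt_of_le_of_ne hp.length_le (fun h => hne (hp.eq_of_length h))
    have hlen : (buf ++ [c]).length ≤ word.length := by simp; omega
    obtain ⟨h2p, h2ne⟩ := pvSubInner_snd word v hw (buf ++ [c])
    show (pvSubInner word v (buf ++ [c])).1
        ++ pvSubGo word v (pvSubInner word v (buf ++ [c])).2 rest = _
    rw [ih _ h2p h2ne, ← pvSubInner_fst word v hw (buf ++ [c]) rest hlen]
    simp

lemma pvSubL_eq (word v : List Char) (hw : word ≠ []) (s : List Char) :
    pvSubL word v s = pvR word v s := by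
  unfold pvSubL
  rw [pvSubGo_spec word v hw s [] List.nil_prefix (fun h => hw h.symm)]
  simp

lemma portB_toList (text : String) :
    (simplify_vocabulary_py_alt text).toList = pvA text.toList := by
  simp only [simplify_vocabulary_py_alt, pvPairs, List.foldl_cons, List.foldl_nil]
  rw [pvSubL_eq _ _ (by decide), pvSubL_eq _ _ (by decide), pvSubL_eq _ _ (by decide),
      pvSubL_eq _ _ (by decide), pvSubL_eq _ _ (by decide)]
  simp [pvA]

-- ===== VERDICT (by name: the statement is the Claim_ definition above) =====
theorem simplify_vocabulary_py_spec : Claim_equal_simplify_vocabulary_py := by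
  intro text _
  show simplify_vocabulary_py text = simplify_vocabulary_py_alt text
  have h : (simplify_vocabulary_py text).toList = (simplify_vocabulary_py_alt text).toList := by
    rw [portA_toList, portB_toList]
  exact String.toList_inj.mp h
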